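-- pv_equiv track=rewrite | github.com/SivaVimel/Matrix | app.py | replace_asterisks_with_strong_tags
-- ===== SOURCE A (Python) =====
-- def replace_asterisks_with_strong_tags(message):
--     result = []
--     strong_tag_open = True
--     i = 0
--
--     while i < len(message):
--         if message[i:i+2] == '**':
--             if strong_tag_open:
--                 result.append('<strong>')
--             else:
--                 result.append('</strong>')
--             strong_tag_open = not strong_tag_open
--             i += 2
--         else:
--             result.append(message[i])
--             i += 1
--
--     return ''.join(result)
-- ===== SOURCE B (Python) =====
-- def replace_asterisks_with_strong_tags(message):
--     parts = message.split('**')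
--     out = [parts[0]]
--     open_next = True
--     for part in parts[1:]:
--         out.append('<strong>' if open_next else '</strong>')
--         out.append(part)
--         open_next = not open_next
--     return ''.join(out)
-- ===== Notes on version B (the rewrite author's own statement) =====
-- stated objective: faster
-- what changed: Replaces the per-character index scan with a single str.split on the double-asterisk marker followed by one join that interleaves alternating opening/closing strong tags between the split segments.
import Mathlib
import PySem

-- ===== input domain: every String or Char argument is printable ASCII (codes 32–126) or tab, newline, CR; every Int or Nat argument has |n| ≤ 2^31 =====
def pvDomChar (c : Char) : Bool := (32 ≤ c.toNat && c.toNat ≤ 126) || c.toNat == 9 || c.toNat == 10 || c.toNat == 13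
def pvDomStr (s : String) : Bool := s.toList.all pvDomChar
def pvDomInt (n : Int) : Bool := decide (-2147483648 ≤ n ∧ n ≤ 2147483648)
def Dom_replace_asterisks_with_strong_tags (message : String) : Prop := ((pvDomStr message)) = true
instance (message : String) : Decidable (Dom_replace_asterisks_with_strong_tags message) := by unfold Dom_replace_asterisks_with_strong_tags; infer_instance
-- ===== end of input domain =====

-- B replaces A's per-character index scan by one split on the double-asterisk marker + a join interleaving alternating tags (objective: faster by a constant factor in Python).

-- ===== PORT A =====
-- the tag appended for the current open/close state ('<strong>' if open else '</strong>')
def pvTag (b : Bool) : List Char :=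
  if b then ['<','s','t','r','o','n','g','>'] else ['<','/','s','t','r','o','n','g','>']

-- A's while loop: if message[i:i+2] == '**' emit the alternating tag, toggle, advance 2; else copy one char and advance 1
def pvLoopA (l : List Char) (b : Bool) : List Char :=
  match l with
  | [] => []
  | c :: rest =>
    if c = '*' ∧ rest.head? = some '*' then pvTag b ++ pvLoopA rest.tail (!b)
    else c :: pvLoopA rest b
termination_by l.length
decreasing_by
  · simp only [List.length_cons, List.length_tail]; omega
  · simp

def replace_asterisks_with_strong_tags (message : String) : String :=
  String.mk (pvLoopA message.toList true)

-- ===== PORT B =====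
-- Source B's loop body: append the alternating tag and the segment, toggle the flag
def pvStepB (st : List (List Char) × Bool) (part : List Char) : List (List Char) × Bool :=
  (st.1 ++ [pvTag st.2, part], !st.2)

def replace_asterisks_with_strong_tags_alt (message : String) : String :=
  let parts := PySem.Chars.splitOn message.toList ['*','*']
  String.mk (PySem.Chars.join [] (parts.tail.foldl pvStepB ([parts.headI], true)).1)

-- ===== PRECONDITION & SPEC =====
def Spec_replace_asterisks_with_strong_tags (message : String) (out : String) : Prop := out = replace_asterisks_with_strong_tags_alt message
instance (message : String) (out : String) : Decidable (Spec_replace_asterisks_with_strong_tags message out) := by unfold Spec_replace_asterisks_with_strong_tags; infer_instance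

-- ===== CLAIM (what is proved, stated in full; the proofs are below) =====
def Claim_equal_replace_asterisks_with_strong_tags : Prop := ∀ (message : String), Dom_replace_asterisks_with_strong_tags message → Spec_replace_asterisks_with_strong_tags message (replace_asterisks_with_strong_tags message)

-- ===== LEMMAS AND PROOFS =====

-- reference splitter: the segments of l cut on non-overlapping left-to-right '**'
def pvSp (l : List Char) : List (List Char) :=
  match l with
  | [] => [[]]
  | c :: rest =>
    if c = '*' ∧ rest.head? = some '*' then [] :: pvSp rest.tail
    else (pvSp rest).modifyHead (c :: ·)
termination_by l.length
decreasing_by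
  · simp only [List.length_cons, List.length_tail]; omega
  · simp

lemma pvSp_ne_nil (l : List Char) : pvSp l ≠ [] := by
  induction l with
  | nil => rw [pvSp.eq_def]; simp
  | cons c rest ih =>
    rw [pvSp.eq_def]
    simp only []
    split
    · simp
    · cases h : pvSp rest with
      | nil => exact absurd h ih
      | cons p ps => simp

lemma pvPrefixIff (c : Char) (rest : List Char) :
    List.isPrefixOf ['*','*'] (c :: rest) = true ↔ c = '*' ∧ rest.head? = some '*' := by
  cases rest with
  | nil => simp [List.isPrefixOf]
  | cons c2 r2 =>
    simp [List.isPrefixOf]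
    constructor
    · rintro ⟨h1, h2⟩; exact ⟨h1.symm, h2.symm⟩
    · rintro ⟨h1, h2⟩; exact ⟨h1.symm, h2.symm⟩

lemma pvGo_eq (fuel : Nat) (l cur : List Char) (acc : List (List Char))
    (h : l.length < fuel) :
    PySem.Chars.splitOn.go ['*','*'] fuel l cur acc
      = acc.reverse ++ (pvSp l).modifyHead (cur.reverse ++ ·) := by
  induction fuel generalizing l cur acc with
  | zero => omega
  | succ f ih =>
    cases l with
    | nil => simp [PySem.Chars.splitOn.go, pvSp]
    | cons c rest =>
      by_cases hc : c = '*' ∧ rest.head? = some '*'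
      · have hp : List.isPrefixOf ['*','*'] (c :: rest) = true := (pvPrefixIff c rest).mpr hc
        rw [show PySem.Chars.splitOn.go ['*','*'] (f+1) (c::rest) cur acc
              = PySem.Chars.splitOn.go ['*','*'] f ((c::rest).drop 2) [] (cur.reverse :: acc) from by
            simp [PySem.Chars.splitOn.go, hp]]
        cases rest with
        | nil => exact absurd hc.2 (by simp)
        | cons c2 r2 =>
          simp only [List.drop_succ_cons, List.drop_zero]
          rw [ih r2 [] (cur.reverse :: acc) (by simp at h ⊢; omega)]
          conv_rhs => rw [pvSp.eq_def]
          simp only []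
          rw [if_pos hc]
          have h2 : c2 = '*' := by simpa using hc.2
          subst h2
          simp only [List.tail_cons]
          cases hr : pvSp r2 with
          | nil => exact absurd hr (pvSp_ne_nil r2)
          | cons p ps => simp
      · have hp : List.isPrefixOf ['*','*'] (c :: rest) = false :=
          Bool.eq_false_iff.mpr (fun h0 => hc ((pvPrefixIff c rest).mp h0))
        rw [show PySem.Chars.splitOn.go ['*','*'] (f+1) (c::rest) cur acc
              = PySem.Chars.splitOn.go ['*','*'] f rest (c :: cur) acc from by
            simp [PySem.Chars.splitOn.go, hp]]
        rw [ih rest (c :: cur) acc (by simp at h ⊢; omega)]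
        conv_rhs => rw [pvSp.eq_def]
        simp only []
        rw [if_neg hc]
        cases hr : pvSp rest with
        | nil => exact absurd hr (pvSp_ne_nil rest)
        | cons p ps => simp

lemma pvSplitOn_eq (l : List Char) :
    PySem.Chars.splitOn l ['*','*'] = pvSp l := by
  show PySem.Chars.splitOn.go ['*','*'] (l.length + 1) l [] [] = pvSp l
  rw [pvGo_eq (l.length + 1) l [] [] (by omega)]
  cases h : pvSp l with
  | nil => exact absurd h (pvSp_ne_nil l)
  | cons p ps => simp

-- the alternating glue: tag, segment, tag, segment, … starting in state b
def pvGlue : Bool → List (List Char) → List Char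
  | _, [] => []
  | b, p :: ps => pvTag b ++ p ++ pvGlue (!b) ps

lemma pvLoopA_eq (l : List Char) (b : Bool) :
    pvLoopA l b = (pvSp l).headI ++ pvGlue b (pvSp l).tail := by
  rw [pvLoopA.eq_def]
  conv_rhs => rw [pvSp.eq_def]
  match l with
  | [] => simp [pvGlue]
  | c :: rest =>
    simp only []
    by_cases hc : c = '*' ∧ rest.head? = some '*'
    · rw [if_pos hc, if_pos hc]
      rw [pvLoopA_eq rest.tail (!b)]
      cases hr : pvSp rest.tail with
      | nil => exact absurd hr (pvSp_ne_nil rest.tail)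
      | cons p ps => simp [pvGlue]
    · rw [if_neg hc, if_neg hc]
      rw [pvLoopA_eq rest b]
      cases hr : pvSp rest with
      | nil => exact absurd hr (pvSp_ne_nil rest)
      | cons p ps => simp
termination_by l.length
decreasing_by
  · simp only [List.length_cons, List.length_tail]; omega
  · simp

lemma pvFoldB_eq (ps : List (List Char)) (acc : List (List Char)) (b : Bool) :
    ((ps.foldl pvStepB (acc, b)).1).flatten = acc.flatten ++ pvGlue b ps := by
  induction ps generalizing acc b with
  | nil => simp [pvGlue]
  | cons p ps ih =>
    simp only [List.foldl_cons, pvStepB]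
    rw [ih]
    simp [pvGlue]

lemma pvFlattenIntersperse (l : List (List Char)) :
    (List.intersperse ([] : List Char) l).flatten = l.flatten := by
  induction l with
  | nil => rfl
  | cons x xs ih =>
    cases xs with
    | nil => rfl
    | cons y ys =>
      have hstep : List.intersperse ([] : List Char) (x :: y :: ys)
          = x :: [] :: List.intersperse [] (y :: ys) := rfl
      rw [hstep]
      simp only [List.flatten_cons] at ih ⊢
      rw [List.nil_append, ih]

lemma pvJoin_nil (l : List (List Char)) : PySem.Chars.join [] l = l.flatten := by
  show List.intercalate [] l = l.flatten
  rw [List.intercalate, pvFlattenIntersperse]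

-- ===== VERDICT (by name: the statement is the Claim_ definition above) =====
theorem replace_asterisks_with_strong_tags_spec : Claim_equal_replace_asterisks_with_strong_tags := by
  intro message _
  unfold Spec_replace_asterisks_with_strong_tags
  unfold replace_asterisks_with_strong_tags replace_asterisks_with_strong_tags_alt
  simp only [pvSplitOn_eq, pvJoin_nil, pvFoldB_eq, pvLoopA_eq]
  cases h : pvSp message.toList with
  | nil => exact absurd h (pvSp_ne_nil message.toList)
  | cons p ps => simp
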